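-- pv_equiv track=rewrite | github.com/thomasverardo/boolean_model | index.py | permutation_word
-- ===== SOURCE A (Python) =====
-- def permutation_word(word_original):
--     perm = list()
--     word = word_original + "$"
--     perm.append(word)
--     for i in range(1, len(word)):
--         word_1 = word[i:]
--         word_2 = word[0:i]
--         word_3 = word_1 + word_2
--         perm.append(word_3)
--
--     return (word_original, tuple(perm))
-- ===== SOURCE B (Python) =====
-- def permutation_word(word_original):
--     # Running-rotation decomposition: each rotation is derived from the
--     # previous one by moving its first character to the end.
--     cur = word_original + "$"
--     perm = [cur]
--     for _ in range(len(word_original)):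
--         cur = cur[1:] + cur[0]
--         perm.append(cur)
--     return (word_original, tuple(perm))
-- ===== Notes on version B (the rewrite author's own statement) =====
-- stated objective: alternative
-- what changed: B maintains a single running rotation (cur = cur[1:] + cur[0]) appended each step, instead of slicing the original string twice per index as A does.
import Mathlib
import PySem

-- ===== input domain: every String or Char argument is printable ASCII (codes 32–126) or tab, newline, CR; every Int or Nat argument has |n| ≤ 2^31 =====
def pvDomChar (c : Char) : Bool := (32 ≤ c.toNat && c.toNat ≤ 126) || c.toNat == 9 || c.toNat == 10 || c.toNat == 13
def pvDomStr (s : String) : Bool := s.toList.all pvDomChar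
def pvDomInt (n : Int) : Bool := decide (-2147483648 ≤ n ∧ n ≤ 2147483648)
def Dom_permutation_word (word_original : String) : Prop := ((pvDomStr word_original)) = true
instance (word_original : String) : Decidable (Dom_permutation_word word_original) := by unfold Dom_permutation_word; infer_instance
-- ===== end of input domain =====

-- B derives each rotation from the previous one by moving its first character
-- to the end (running-state loop), instead of slicing the original per index;
-- same cost, different decomposition.


-- ===== PORT A =====
-- literal port of A: word = word_original + "$"; perm = [word];
-- for i in range(1, len(word)): perm.append(word[i:] + word[0:i])
def permutation_word (word_original : String) : String × List String :=
  let word : List Char := word_original.toList ++ ['$']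
  let perm : List (List Char) := [word]
  let perm := (PySem.List.pyRange 1 (word.length : Int) 1).foldl
    (fun acc i =>
      let word_1 := PySem.List.slice word (some i) none
      let word_2 := PySem.List.slice word (some 0) (some i)
      let word_3 := word_1 ++ word_2
      acc ++ [word_3]) perm
  (word_original, perm.map String.ofList)

-- ===== PORT B =====
-- literal port of B: cur = word_original + "$"; perm = [cur];
-- repeat len(word_original) times: cur = cur[1:] + cur[0]; perm.append(cur)
-- (cur[1:] + cur[0] is ported as drop 1 ++ take 1; exact since cur is never empty)
def permutation_word_alt (word_original : String) : String × List String :=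
  let init : List Char := word_original.toList ++ ['$']
  let st := (List.range word_original.toList.length).foldl
    (fun (st : List Char × List (List Char)) _ =>
      let cur := st.1.drop 1 ++ st.1.take 1
      (cur, st.2 ++ [cur])) (init, [init])
  (word_original, st.2.map String.ofList)

-- ===== PRECONDITION & SPEC =====
def Spec_permutation_word (word_original : String) (out : String × List String) : Prop := out = permutation_word_alt word_original
instance (word_original : String) (out : String × List String) : Decidable (Spec_permutation_word word_original out) := by unfold Spec_permutation_word; infer_instance

-- ===== CLAIM (what is proved, stated in full; the proofs are below) =====
def Claim_equal_permutation_word : Prop := ∀ (word_original : String), Dom_permutation_word word_original → Spec_permutation_word word_original (permutation_word word_original)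

-- ===== LEMMAS AND PROOFS =====

/-- Appending singletons in a fold is mapping. -/
theorem foldl_append_singleton {α β : Type} (f : α → β) (l : List α) (acc : List β) :
    l.foldl (fun acc i => acc ++ [f i]) acc = acc ++ l.map f := by
  induction l generalizing acc with
  | nil => simp
  | cons x xs ih => simp [ih]

/-- One rotation step turns the k-th rotation into the (k+1)-th. -/
theorem rot_step {α : Type} (w : List α) (k : Nat) (hk : k < w.length) :
    (w.drop k ++ w.take k).drop 1 ++ (w.drop k ++ w.take k).take 1
      = w.drop (k + 1) ++ w.take (k + 1) := by
  have hd : w.drop k = w[k] :: w.drop (k + 1) := List.drop_eq_getElem_cons hk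
  have ht : w.take (k + 1) = w.take k ++ [w[k]] := by
    rw [List.take_add_one]
    simp [List.getElem?_eq_getElem hk]
  rw [hd, ht]
  simp only [List.cons_append, List.drop_succ_cons, List.drop_zero,
    List.take_succ_cons, List.take_zero]
  simp [List.append_assoc]

/-- Invariant of B's loop: after m steps the state is the m-th rotation and the
    accumulator has gained rotations 1..m. -/
theorem alt_loop_inv {α : Type} (w : List α) (m : Nat) (hm : m ≤ w.length)
    (acc : List (List α)) :
    (List.range m).foldl
      (fun (st : List α × List (List α)) _ =>
        (st.1.drop 1 ++ st.1.take 1, st.2 ++ [st.1.drop 1 ++ st.1.take 1]))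
      (w, acc)
    = (w.drop m ++ w.take m,
       acc ++ (List.range m).map (fun i => w.drop (i + 1) ++ w.take (i + 1))) := by
  induction m generalizing acc with
  | zero => simp
  | succ m ih =>
    have hm' : m ≤ w.length := Nat.le_of_succ_le hm
    rw [List.range_succ, List.foldl_append, ih hm' acc]
    simp only [List.foldl_cons, List.foldl_nil, List.map_append]
    rw [rot_step w m (Nat.lt_of_succ_le hm)]
    simp

/-- A's per-index slice computation is the i-th rotation. -/
theorem a_slice_eq (w : List Char) (k : Nat) :
    PySem.List.slice w (some ((1 : Int) + (k : Nat))) none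
      ++ PySem.List.slice w (some 0) (some ((1 : Int) + (k : Nat))) =
    w.drop (k + 1) ++ w.take (k + 1) := by
  have h1 : ((1 : Int) + (k : Nat)) = ((k + 1 : Nat) : Int) := by push_cast; ring
  rw [h1, PySem.List.slice_from_natCast, PySem.List.slice_zero_start,
    PySem.List.slice_to_natCast]

theorem permutation_word_eq (word_original : String) :
    permutation_word word_original = permutation_word_alt word_original := by
  unfold permutation_word permutation_word_alt
  dsimp only
  set w : List Char := word_original.toList ++ ['$'] with hw
  have hlen : w.length = word_original.toList.length + 1 := by simp [hw]
  have hn : ((w.length : Int) - 1).toNat = word_original.toList.length := by omega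
  rw [PySem.List.pyRange_one, foldl_append_singleton, hn,
    alt_loop_inv w word_original.toList.length (by omega)]
  simp only [List.map_map, List.map_cons, List.singleton_append]
  congr 1
  congr 1
  congr 1
  funext k
  exact congrArg String.ofList (a_slice_eq w k)

-- ===== VERDICT (by name: the statement is the Claim_ definition above) =====
theorem permutation_word_spec : Claim_equal_permutation_word := by
  intro w _
  unfold Spec_permutation_word
  exact permutation_word_eq w
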